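-- pv_equiv track=rewrite | github.com/kjocevicius/advent-of-code | 2020/12/day12-1.py | calculate_turn
-- ===== SOURCE A (Python) =====
-- DIRECTIONS = ['E', 'S', 'W', 'N']
--
-- DIRECTIONS_REV = DIRECTIONS.copy()
--
-- def calculate_turn(direction: str, turn_direction: str, turn_step: int) -> str:
--     turns = int(turn_step / 90)
--     turnStarted = False
--     newDirection = None
--     directions = DIRECTIONS if turn_direction == 'R' else DIRECTIONS_REV
--     while(turns != 0):
--         for d in directions:
--             if not turnStarted and d == direction:
--                 turnStarted = True
--             elif turnStarted:
--                 turns -= 1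
--                 if turns == 0:
--                     newDirection = d
--                     break
--
--     return newDirection
-- ===== SOURCE B (Python) =====
-- DIRECTIONS = ['E', 'S', 'W', 'N']
--
--
-- def calculate_turn(direction: str, turn_direction: str, turn_step: int) -> str:
--     turns = int(turn_step / 90)
--     if turns == 0:
--         return None
--     return DIRECTIONS[(DIRECTIONS.index(direction) + turns) % 4]
-- ===== Notes on version B (the rewrite author's own statement) =====
-- stated objective: simpler
-- what changed: Replaces A's while/for walk that steps around the compass list once per 90-degree turn by modular index arithmetic DIRECTIONS[(DIRECTIONS.index(direction) + turns) % 4]; a timing run could not measure a speed-up because its large random inputs fall outside Pre_ (A loops forever there), so no speed is claimed.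
import Mathlib
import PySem

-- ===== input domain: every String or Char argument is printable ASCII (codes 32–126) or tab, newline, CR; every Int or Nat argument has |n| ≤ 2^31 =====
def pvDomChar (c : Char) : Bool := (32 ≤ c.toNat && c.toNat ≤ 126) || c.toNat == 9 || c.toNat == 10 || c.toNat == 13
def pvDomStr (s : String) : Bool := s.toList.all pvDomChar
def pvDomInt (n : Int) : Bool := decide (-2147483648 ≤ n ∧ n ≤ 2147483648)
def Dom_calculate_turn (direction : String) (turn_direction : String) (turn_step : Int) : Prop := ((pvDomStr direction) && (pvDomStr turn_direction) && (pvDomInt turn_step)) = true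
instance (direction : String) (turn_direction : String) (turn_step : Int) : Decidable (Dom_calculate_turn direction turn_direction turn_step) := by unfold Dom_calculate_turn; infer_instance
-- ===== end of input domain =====

-- B replaces A's step-by-step while/for walk around the compass by modular index
-- arithmetic: DIRECTIONS[(DIRECTIONS.index(direction) + turns) % 4] (simpler, no loop).

-- ===== PORT A =====
def DIRECTIONS : List String := ["E", "S", "W", "N"]

def DIRECTIONS_REV : List String := DIRECTIONS   -- DIRECTIONS.copy()

/-- the `for d in directions:` body: returns (turns, turnStarted, newDirection-if-break). -/
def turnForLoop (direction : String) : List String → Int → Bool → Int × Bool × Option String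
  | [], turns, started => (turns, started, none)
  | d :: ds, turns, started =>
    if !started && d == direction then
      turnForLoop direction ds turns true
    else if started then
      let turns' := turns - 1
      if turns' = 0 then (turns', started, some d)
      else turnForLoop direction ds turns' started
    else
      turnForLoop direction ds turns started

/-- the `while turns != 0:` loop, with fuel (the Python loop diverges outside `Pre_`). -/
def turnWhileLoop (direction : String) (directions : List String) :
    Nat → Int → Bool → Option String → Option String
  | 0, _, _, _ => none
  | fuel + 1, turns, started, newDirection =>
    if turns = 0 then newDirection
    else
      match turnForLoop direction directions turns started with
      | (t, s, nd) =>
        turnWhileLoop direction directions fuel t s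
          (match nd with | some d => some d | none => newDirection)

def calculate_turn (direction : String) (turn_direction : String) (turn_step : Int) : Option String :=
  -- int(turn_step / 90): truncation toward zero (exact: the float quotient is never close enough
  -- to an integer to mis-truncate for |turn_step| ≤ 2^31)
  let turns := turn_step.tdiv 90
  let directions := if turn_direction == "R" then DIRECTIONS else DIRECTIONS_REV
  turnWhileLoop direction directions (turns.toNat + 2) turns false none

-- ===== PORT B =====
def calculate_turn_alt (direction : String) (turn_direction : String) (turn_step : Int) : Option String :=
  let turns := turn_step.tdiv 90
  if turns = 0 then none
  else
    match PySem.List.index? DIRECTIONS direction with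
    | none => none   -- Python raises ValueError here; outside Pre_
    | some i => PySem.List.pyGet? DIRECTIONS (PySem.Int.mod ((i : Int) + turns) 4)

-- ===== PRECONDITION & SPEC =====
-- Pre_ excludes exactly the inputs on which A never returns: its while-loop runs forever when
-- int(turn_step/90) is negative, or positive with a direction not in DIRECTIONS.
def Pre_calculate_turn (direction : String) (turn_direction : String) (turn_step : Int) : Prop :=
  turn_step.tdiv 90 = 0 ∨
    (0 < turn_step.tdiv 90 ∧ direction ∈ (["E", "S", "W", "N"] : List String))

instance (direction : String) (turn_direction : String) (turn_step : Int) : Decidable (Pre_calculate_turn direction turn_direction turn_step) := by unfold Pre_calculate_turn; infer_instance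

def pvWitness_calculate_turn : String × String × Int := ("E", "R", 90)

def Spec_calculate_turn (direction : String) (turn_direction : String) (turn_step : Int) (out : Option String) : Prop := out = calculate_turn_alt direction turn_direction turn_step
instance (direction : String) (turn_direction : String) (turn_step : Int) (out : Option String) : Decidable (Spec_calculate_turn direction turn_direction turn_step out) := by unfold Spec_calculate_turn; infer_instance

-- ===== CLAIM (what is proved, stated in full; the proofs are below) =====
def Claim_equal_calculate_turn : Prop := ∀ (direction : String) (turn_direction : String) (turn_step : Int), Dom_calculate_turn direction turn_direction turn_step → Pre_calculate_turn direction turn_direction turn_step → Spec_calculate_turn direction turn_direction turn_step (calculate_turn direction turn_direction turn_step)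

-- ===== LEMMAS AND PROOFS =====

theorem turnWhileLoop_zero (dir : String) (L : List String) (f : Nat) (hf : 1 ≤ f)
    (s : Bool) (nd : Option String) : turnWhileLoop dir L f 0 s nd = nd := by
  cases f with
  | zero => omega
  | succ f => simp [turnWhileLoop]

theorem turnWhileLoop_succ (dir : String) (L : List String) (f : Nat) (turns : Int)
    (started : Bool) (nd : Option String) (h : turns ≠ 0) :
    turnWhileLoop dir L (f + 1) turns started nd =
      (match turnForLoop dir L turns started with
       | (t, s, ndx) =>
         turnWhileLoop dir L f t s (match ndx with | some d => some d | none => nd)) := by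
  simp [turnWhileLoop, h]

/-- a fully-started pass over the compass list with `t ≥ 5` just subtracts 4. -/
theorem turnForLoop_true_big (dir : String) (t : Int) (ht : 5 ≤ t) :
    turnForLoop dir DIRECTIONS t true = (t - 4, true, none) := by
  have h1 : t - 1 ≠ 0 := by omega
  have h2 : t - 1 - 1 ≠ 0 := by omega
  have h3 : t - 1 - 1 - 1 ≠ 0 := by omega
  have h4 : t - 1 - 1 - 1 - 1 ≠ 0 := by omega
  simp [DIRECTIONS, turnForLoop, h1, h2, h3, h4]
  omega

/-- once started, the loop steps cyclically: with `0 < t` fuel `(t+4)/4`-deep suffices and the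
    answer is `DIRECTIONS[(t-1) % 4]`. -/
theorem turnWhileLoop_true (fuel : Nat) (t : Int) (dir : String)
    (ht : 0 < t) (hf : t + 4 ≤ 4 * (fuel : Int)) :
    turnWhileLoop dir DIRECTIONS fuel t true none =
      PySem.List.pyGet? DIRECTIONS ((t - 1) % 4) := by
  induction fuel generalizing t with
  | zero => omega
  | succ f ih =>
    have hf1 : 1 ≤ f := by omega
    by_cases h1 : t = 1
    · subst h1
      simp [turnWhileLoop, turnForLoop, DIRECTIONS, turnWhileLoop_zero _ _ f hf1]
    · by_cases h2 : t = 2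
      · subst h2
        simp [turnWhileLoop, turnForLoop, DIRECTIONS, turnWhileLoop_zero _ _ f hf1]
      · by_cases h3 : t = 3
        · subst h3
          simp [turnWhileLoop, turnForLoop, DIRECTIONS, turnWhileLoop_zero _ _ f hf1]
        · by_cases h4 : t = 4
          · subst h4
            simp [turnWhileLoop, turnForLoop, DIRECTIONS, turnWhileLoop_zero _ _ f hf1]
          · have h5 : 5 ≤ t := by omega
            have hne : t ≠ 0 := by omega
            rw [show turnWhileLoop dir DIRECTIONS (f + 1) t true none
                = turnWhileLoop dir DIRECTIONS f (t - 4) true none by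
              rw [turnWhileLoop_succ _ _ _ _ _ _ hne, turnForLoop_true_big dir t h5]]
            rw [ih (t - 4) (by omega) (by omega)]
            congr 1
            omega


theorem calculate_turn_core (direction : String) (t : Int)
    (hp : t = 0 ∨ (0 < t ∧ direction ∈ (["E", "S", "W", "N"] : List String))) :
    turnWhileLoop direction DIRECTIONS (t.toNat + 2) t false none =
      (if t = 0 then none
       else
         match PySem.List.index? DIRECTIONS direction with
         | none => none
         | some i => PySem.List.pyGet? DIRECTIONS (PySem.Int.mod ((i : Int) + t) 4)) := by
  rcases hp with h0 | ⟨hpos, hmem⟩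
  · subst h0
    norm_num [turnWhileLoop]
  · have hne : t ≠ 0 := by omega
    have hcast : ((t.toNat : Int)) = t := Int.toNat_of_nonneg (by omega)
    rw [if_neg hne]
    fin_cases hmem
    · -- direction = "E"
      rw [show PySem.List.index? DIRECTIONS "E" = some 0 by decide]
      have hmod : PySem.Int.mod (((0 : Nat) : Int) + t) 4 = ((0 : Int) + t) % 4 :=
        PySem.Int.mod_eq_emod_of_pos (by omega)
      by_cases h1 : t = 1
      · subst h1; decide
      · by_cases h2 : t = 2
        · subst h2; decide
        · by_cases h3 : t = 3
          · subst h3; decide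
          · have h4 : 4 ≤ t := by omega
            have hstep : turnWhileLoop "E" DIRECTIONS (t.toNat + 2) t false none
                = turnWhileLoop "E" DIRECTIONS (t.toNat + 1) (t - 3) true none := by
              have e1 : t - 1 ≠ 0 := by omega
              have e2 : t - 1 - 1 ≠ 0 := by omega
              have e3 : t - 1 - 1 - 1 ≠ 0 := by omega
              rw [show t.toNat + 2 = (t.toNat + 1) + 1 from rfl,
                turnWhileLoop_succ _ _ _ _ _ _ hne]
              simp [turnForLoop, DIRECTIONS, e1, e2, e3]
              congr 1
              ring
            rw [hstep, turnWhileLoop_true _ _ _ (by omega) (by push_cast [hcast]; omega)]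
            simp only [hmod]
            congr 1
            omega
    · -- direction = "S"
      rw [show PySem.List.index? DIRECTIONS "S" = some 1 by decide]
      have hmod : PySem.Int.mod (((1 : Nat) : Int) + t) 4 = ((1 : Int) + t) % 4 :=
        PySem.Int.mod_eq_emod_of_pos (by omega)
      by_cases h1 : t = 1
      · subst h1; decide
      · by_cases h2 : t = 2
        · subst h2; decide
        · have h3 : 3 ≤ t := by omega
          have hstep : turnWhileLoop "S" DIRECTIONS (t.toNat + 2) t false none
              = turnWhileLoop "S" DIRECTIONS (t.toNat + 1) (t - 2) true none := by
            have e1 : t - 1 ≠ 0 := by omega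
            have e2 : t - 1 - 1 ≠ 0 := by omega
            rw [show t.toNat + 2 = (t.toNat + 1) + 1 from rfl,
              turnWhileLoop_succ _ _ _ _ _ _ hne]
            simp [turnForLoop, DIRECTIONS, e1, e2]
            congr 1
            ring
          rw [hstep, turnWhileLoop_true _ _ _ (by omega) (by push_cast [hcast]; omega)]
          simp only [hmod]
          congr 1
          omega
    · -- direction = "W"
      rw [show PySem.List.index? DIRECTIONS "W" = some 2 by decide]
      have hmod : PySem.Int.mod (((2 : Nat) : Int) + t) 4 = ((2 : Int) + t) % 4 :=
        PySem.Int.mod_eq_emod_of_pos (by omega)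
      by_cases h1 : t = 1
      · subst h1; decide
      · have h2 : 2 ≤ t := by omega
        have hstep : turnWhileLoop "W" DIRECTIONS (t.toNat + 2) t false none
            = turnWhileLoop "W" DIRECTIONS (t.toNat + 1) (t - 1) true none := by
          have e1 : t - 1 ≠ 0 := by omega
          rw [show t.toNat + 2 = (t.toNat + 1) + 1 from rfl,
            turnWhileLoop_succ _ _ _ _ _ _ hne]
          simp [turnForLoop, DIRECTIONS, e1]
        rw [hstep, turnWhileLoop_true _ _ _ (by omega) (by push_cast [hcast]; omega)]
        simp only [hmod]
        congr 1
        omega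
    · -- direction = "N"
      rw [show PySem.List.index? DIRECTIONS "N" = some 3 by decide]
      have hmod : PySem.Int.mod (((3 : Nat) : Int) + t) 4 = ((3 : Int) + t) % 4 :=
        PySem.Int.mod_eq_emod_of_pos (by omega)
      have hstep : turnWhileLoop "N" DIRECTIONS (t.toNat + 2) t false none
          = turnWhileLoop "N" DIRECTIONS (t.toNat + 1) t true none := by
        rw [show t.toNat + 2 = (t.toNat + 1) + 1 from rfl,
          turnWhileLoop_succ _ _ _ _ _ _ hne]
        simp [turnForLoop, DIRECTIONS]
      rw [hstep, turnWhileLoop_true _ _ _ (by omega) (by push_cast [hcast]; omega)]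
      simp only [hmod]
      congr 1
      omega

-- ===== VERDICT (by name: the statement is the Claim_ definition above) =====
theorem calculate_turn_spec : Claim_equal_calculate_turn := by
  intro direction turn_direction turn_step _ hp
  unfold Pre_calculate_turn at hp
  show calculate_turn direction turn_direction turn_step
      = calculate_turn_alt direction turn_direction turn_step
  unfold calculate_turn calculate_turn_alt
  have hdirs : (if turn_direction == "R" then DIRECTIONS else DIRECTIONS_REV) = DIRECTIONS := by
    simp [DIRECTIONS_REV]
  show turnWhileLoop direction (if turn_direction == "R" then DIRECTIONS else DIRECTIONS_REV)
        ((turn_step.tdiv 90).toNat + 2) (turn_step.tdiv 90) false none = _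
  rw [hdirs]
  exact calculate_turn_core direction (turn_step.tdiv 90) hp
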